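-- pv_equiv track=rewrite | github.com/ngcvm/python-fundamental | bai5/bai5-5.py | cal_D
-- ===== SOURCE A (Python) =====
-- def cal_D (num):
--     if num < 1:
--         return 0
--     result = 1
--     counter = 1
--     while counter <= num:
--         if counter % 3 == 0:
--             result *= counter
--         counter += 1
--     return result
-- ===== SOURCE B (Python) =====
-- import math
--
-- def cal_D(num):
--     if num < 1:
--         return 0
--     m = num // 3
--     return 3 ** m * math.factorial(m)
-- ===== Notes on version B (the rewrite author's own statement) =====
-- stated objective: faster
-- what changed: Replaced the counter loop over the whole range by the closed form power-of-three times factorial of m, with m = num // 3, since the product of the multiples of three up to num factors that way.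
import Mathlib
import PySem

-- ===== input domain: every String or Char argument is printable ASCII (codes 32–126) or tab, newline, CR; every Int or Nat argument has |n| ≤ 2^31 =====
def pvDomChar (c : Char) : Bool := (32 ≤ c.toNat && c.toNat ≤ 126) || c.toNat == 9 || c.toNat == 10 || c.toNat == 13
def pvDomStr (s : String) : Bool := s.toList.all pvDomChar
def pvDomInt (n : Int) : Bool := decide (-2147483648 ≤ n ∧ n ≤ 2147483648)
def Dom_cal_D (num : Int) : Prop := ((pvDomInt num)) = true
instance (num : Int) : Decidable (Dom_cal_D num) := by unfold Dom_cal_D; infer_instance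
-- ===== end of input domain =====

-- B replaces A's counter loop by the closed form 3^m * m! (m = num//3); return values agree everywhere.

-- ===== PORT A =====
-- while counter <= num: if counter % 3 == 0: result *= counter; counter += 1
def cal_D_loop (num counter result : Int) : Int :=
  if _h : counter ≤ num then
    cal_D_loop num (counter + 1) (if PySem.Int.mod counter 3 = 0 then result * counter else result)
  else result
termination_by (num + 1 - counter).toNat
decreasing_by omega

def cal_D (num : Int) : Int :=
  if num < 1 then 0
  else cal_D_loop num 1 1

-- ===== PORT B =====
def cal_D_alt (num : Int) : Int :=
  if num < 1 then 0
  else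
    let m : Int := PySem.Int.floordiv num 3
    3 ^ m.toNat * (Nat.factorial m.toNat : Int)

-- ===== PRECONDITION & SPEC =====
def Spec_cal_D (num : Int) (out : Int) : Prop := out = cal_D_alt num
instance (num : Int) (out : Int) : Decidable (Spec_cal_D num out) := by unfold Spec_cal_D; infer_instance

-- ===== CLAIM (what is proved, stated in full; the proofs are below) =====
def Claim_equal_cal_D : Prop := ∀ (num : Int), Dom_cal_D num → Spec_cal_D num (cal_D num)

-- ===== LEMMAS AND PROOFS =====

-- Peel the top counter value off the loop: running up to num is running up to num-1
-- and then multiplying in num when it is a multiple of 3.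
theorem cal_D_loop_stop (num c r : Int) (h : num < c) : cal_D_loop num c r = r := by
  rw [cal_D_loop]; exact dif_neg (by omega)

theorem cal_D_loop_peel (num c r : Int) (h : c ≤ num) :
    cal_D_loop num c r =
      cal_D_loop (num - 1) c r * (if PySem.Int.mod num 3 = 0 then num else 1) := by
  by_cases hc : c = num
  · subst hc
    rw [cal_D_loop, dif_pos (le_refl c), cal_D_loop_stop _ _ _ (by omega),
        cal_D_loop_stop _ _ _ (by omega)]
    split_ifs <;> ring
  · have hlt : c < num := lt_of_le_of_ne h hc
    rw [cal_D_loop, dif_pos h,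
        show cal_D_loop (num - 1) c r
            = cal_D_loop (num - 1) (c + 1)
                (if PySem.Int.mod c 3 = 0 then r * c else r) by
          rw [cal_D_loop, dif_pos (by omega : c ≤ num - 1)]]
    exact cal_D_loop_peel num (c + 1) _ (by omega)
termination_by (num - c).toNat
decreasing_by omega

theorem mod_cast3 (n : Nat) : PySem.Int.mod (n : Int) 3 = ((n % 3 : Nat) : Int) :=
  PySem.Int.mod_natCast n 3

theorem floordiv_cast3 (n : Nat) : PySem.Int.floordiv (n : Int) 3 = ((n / 3 : Nat) : Int) :=
  PySem.Int.floordiv_natCast n 3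

-- Closed form of the loop started at 1, over natural num.
theorem cal_D_loop_closed (n : Nat) :
    cal_D_loop (n : Int) 1 1 = 3 ^ (n / 3) * (Nat.factorial (n / 3) : Int) := by
  induction n with
  | zero =>
    rw [cal_D_loop]
    norm_num [Nat.factorial]
  | succ k ih =>
    have h1 : (1 : Int) ≤ ((k + 1 : Nat) : Int) := by exact_mod_cast Nat.one_le_iff_ne_zero.mpr (Nat.succ_ne_zero k)
    rw [cal_D_loop_peel _ _ _ h1]
    have hsub : ((k + 1 : Nat) : Int) - 1 = (k : Int) := by push_cast; ring
    rw [hsub, ih, mod_cast3]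
    by_cases h3 : (k + 1) % 3 = 0
    · have hd : (k + 1) / 3 = k / 3 + 1 := by omega
      have hq : k + 1 = 3 * (k / 3 + 1) := by omega
      rw [if_pos (by exact_mod_cast congrArg (Nat.cast : Nat → Int) h3),
          hd, Nat.factorial_succ, pow_succ]
      have hk1 : ((k + 1 : Nat) : Int) = 3 * (((k / 3 : Nat) : Int) + 1) := by
        exact_mod_cast congrArg (Nat.cast : Nat → Int) hq
      push_cast
      push_cast at hk1
      rw [hk1]; ring
    · have hd : (k + 1) / 3 = k / 3 := by omega
      rw [if_neg (by exact_mod_cast fun h => h3 (by exact_mod_cast h)), hd]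
      ring

-- ===== VERDICT (by name: the statement is the Claim_ definition above) =====
theorem cal_D_spec : Claim_equal_cal_D := by
  intro num _
  unfold Spec_cal_D cal_D cal_D_alt
  by_cases h : num < 1
  · simp [h]
  · rw [if_neg h, if_neg h]
    have hn : num = ((num.toNat : Nat) : Int) := by omega
    rw [hn, cal_D_loop_closed, floordiv_cast3]
    simp only [Int.toNat_natCast]
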